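-- pv_equiv track=rewrite | github.com/DimCrimson/dimcrimson.github.io | lab/Azure/AzureOAuthExposureScanner/oauth_scanner.py | build_activity_index
-- ===== SOURCE A (Python) =====
-- def build_activity_index(signins):
--     index = {}
--
--     for s in signins:
--
--         app_id = s.get("appId") or s.get("appDisplayName")
--
--         ts = s.get("createdDateTime")
--
--         if not app_id or not ts:
--             continue
--
--         index.setdefault(app_id, []).append(ts)
--
--     return index
-- ===== SOURCE B (Python) =====
-- def build_activity_index(signins):
--     pairs = [(s.get("appId") or s.get("appDisplayName"), s.get("createdDateTime"))
--              for s in signins]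
--     pairs = [(a, t) for a, t in pairs if a and t]
--     keys = list(dict.fromkeys(a for a, _ in pairs))
--     return {k: [t for a, t in pairs if a == k] for k in keys}
-- ===== Notes on version B (the rewrite author's own statement) =====
-- stated objective: alternative
-- what changed: Replaces the single-pass setdefault-accumulation loop with a two-phase pipeline: first filter the sign-ins to (app_id, ts) pairs, then dedup the keys in first-occurrence order and collect each key's timestamps with a per-key scan.
import Mathlib
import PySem

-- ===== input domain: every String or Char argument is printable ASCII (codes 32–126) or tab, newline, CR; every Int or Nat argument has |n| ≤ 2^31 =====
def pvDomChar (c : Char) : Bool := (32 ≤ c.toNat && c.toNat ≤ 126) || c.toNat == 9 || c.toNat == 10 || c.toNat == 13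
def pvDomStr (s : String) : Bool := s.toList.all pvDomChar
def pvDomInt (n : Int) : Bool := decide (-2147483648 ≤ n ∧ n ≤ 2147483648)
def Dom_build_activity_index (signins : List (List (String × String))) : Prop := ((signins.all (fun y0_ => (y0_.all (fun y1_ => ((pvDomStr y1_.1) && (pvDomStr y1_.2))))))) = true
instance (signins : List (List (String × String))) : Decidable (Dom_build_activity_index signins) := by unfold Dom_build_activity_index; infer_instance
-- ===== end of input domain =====

-- B replaces A's one-pass setdefault loop with a filter-then-group pipeline (same return value; no speed claim).

-- shared key logic: Python's `s.get("appId") or s.get("appDisplayName")` (None and "" are falsy)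
def pvAppId (s : List (String × String)) : Option String :=
  match (PySem.Dict.mk s).get? "appId" with
  | some v => if v = "" then (PySem.Dict.mk s).get? "appDisplayName" else some v
  | none => (PySem.Dict.mk s).get? "appDisplayName"

-- ===== PORT A =====
def build_activity_index (signins : List (List (String × String))) : List (String × List String) :=
  (signins.foldl (fun index s =>
      let app_id := pvAppId s
      let ts := (PySem.Dict.mk s).get? "createdDateTime"
      match app_id, ts with
      | some a, some t =>
          if a = "" ∨ t = "" then index          -- `if not app_id or not ts: continue`
          else index.modify a [] (· ++ [t])       -- `index.setdefault(app_id, []).append(ts)`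
      | _, _ => index)                            -- `not app_id or not ts` (None case)
    PySem.Dict.empty).items

-- ===== PORT B =====
def build_activity_index_alt (signins : List (List (String × String))) : List (String × List String) :=
  let pairs :=
    ((signins.map (fun s => (pvAppId s, (PySem.Dict.mk s).get? "createdDateTime"))).filterMap
      (fun p => match p.1 with
        | none => none
        | some a =>
          match p.2 with
          | none => none
          | some t => if a ≠ "" ∧ t ≠ "" then some (a, t) else none))
  let keys := PySem.List.dedup (pairs.map Prod.fst)   -- list(dict.fromkeys(...))
  (keys.foldl (fun d k =>
      d.insert k (pairs.filterMap (fun p => if p.1 == k then some p.2 else none)))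
    PySem.Dict.empty).items

-- ===== PRECONDITION & SPEC =====
def Spec_build_activity_index (signins : List (List (String × String))) (out : List (String × List String)) : Prop := out = build_activity_index_alt signins
instance (signins : List (List (String × String))) (out : List (String × List String)) : Decidable (Spec_build_activity_index signins out) := by unfold Spec_build_activity_index; infer_instance

-- ===== CLAIM (what is proved, stated in full; the proofs are below) =====
def Claim_equal_build_activity_index : Prop := ∀ (signins : List (List (String × String))), Dom_build_activity_index signins → Spec_build_activity_index signins (build_activity_index signins)

-- ===== LEMMAS AND PROOFS =====

-- the filtered (app_id, ts) pairs both programs are driven by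
def pvPairs (signins : List (List (String × String))) : List (String × String) :=
  (signins.map (fun s => (pvAppId s, (PySem.Dict.mk s).get? "createdDateTime"))).filterMap
    (fun p => match p.1 with
      | none => none
      | some a =>
        match p.2 with
        | none => none
        | some t => if a ≠ "" ∧ t ≠ "" then some (a, t) else none)

-- A's loop over signins is the modify-append loop over the filtered pairs
theorem pvA_foldl_eq (signins : List (List (String × String))) (d : PySem.Dict String (List String)) :
    signins.foldl (fun index s =>
      let app_id := pvAppId s
      let ts := (PySem.Dict.mk s).get? "createdDateTime"
      match app_id, ts with
      | some a, some t => if a = "" ∨ t = "" then index else index.modify a [] (· ++ [t])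
      | _, _ => index) d
    = (pvPairs signins).foldl (fun d p => d.modify p.1 [] (· ++ [p.2])) d := by
  induction signins generalizing d with
  | nil => rfl
  | cons s rest ih =>
      simp only [pvPairs, List.map_cons, List.filterMap_cons, List.foldl_cons] at *
      cases h1 : pvAppId s with
      | none => simpa [h1] using ih d
      | some a =>
          cases h2 : (PySem.Dict.mk s).get? "createdDateTime" with
          | none => simpa [h1, h2] using ih d
          | some t =>
              by_cases ha : a = "" <;> by_cases ht : t = "" <;>
                simp [ha, ht, ih]

theorem pv_filterMap_eq_map_filter (ps : List (String × String)) (k : String) :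
    ps.filterMap (fun p => if p.1 == k then some p.2 else none)
      = (ps.filter (fun p => p.1 == k)).map Prod.snd := by
  induction ps with
  | nil => rfl
  | cons p rest ih =>
      by_cases h : p.1 = k <;> simp [h, beq_iff_eq] at ih ⊢ <;> exact ih

-- the per-key grouping loop of A equals B's dedup-keys + per-key-scan construction
theorem pv_core (ps : List (String × String)) :
    (ps.foldl (fun d p => d.modify p.1 [] (· ++ [p.2])) PySem.Dict.empty).items
      = ((PySem.List.dedup (ps.map Prod.fst)).foldl (fun d k =>
            d.insert k (ps.filterMap (fun p => if p.1 == k then some p.2 else none)))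
          PySem.Dict.empty).items := by
  have hnd : (ps.foldl (fun d p => d.modify p.1 [] (· ++ [p.2])) PySem.Dict.empty).keys.Nodup :=
    PySem.Dict.nodup_keys_foldl_modify_key ps Prod.fst [] (fun _ p => (· ++ [p.2]))
      PySem.Dict.empty PySem.Dict.nodup_keys_empty
  rw [PySem.Dict.items_eq_map_keys _ hnd [], PySem.Dict.items_foldl_insert_fresh]
  · have hemp : (PySem.Dict.empty : PySem.Dict String (List String)).items = [] := rfl
    rw [hemp, List.nil_append]
    simp only [PySem.Dict.keys_foldl_modify_key, PySem.Dict.keys_empty,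
      PySem.Set.update_nil_left, ← PySem.List.dedup_eq_ofList]
    refine List.map_congr_left (fun k hk => ?_)
    rw [PySem.Dict.getD_foldl_modify_append, PySem.Dict.getD_empty, List.nil_append,
      pv_filterMap_eq_map_filter]
  · intro a _; exact PySem.Dict.contains_empty a
  · simp only [List.map_id']
    exact PySem.List.nodup_dedup (ps.map Prod.fst)

-- ===== VERDICT (by name: the statement is the Claim_ definition above) =====
theorem build_activity_index_spec : Claim_equal_build_activity_index := by
  intro signins _
  show build_activity_index signins = build_activity_index_alt signins
  unfold build_activity_index build_activity_index_alt
  rw [pvA_foldl_eq]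
  exact pv_core (pvPairs signins)
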